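-- pv_equiv track=rewrite | github.com/parkedwin/FourPlay | display2DBoard.py | rowWin
-- ===== SOURCE A (Python) =====
-- def rowWin(row):
-- 	if (0 not in row):
-- 		tempDict = {}
-- 		for elem in row:
-- 			tempDict[elem] = 1
-- 		if(len(tempDict) == 1):
-- 			return True
-- 	return False
-- ===== SOURCE B (Python) =====
-- def rowWin(row):
-- 	return bool(row) and min(row) == max(row) != 0
-- ===== Notes on version B (the rewrite author's own statement) =====
-- stated objective: alternative
-- what changed: Replaces the membership scan plus dict construction and cardinality test with an extrema reduction: the row is a win iff it is nonempty and min(row) == max(row) != 0 (all-equal is expressed as equality of the two extrema, and a zero entry is then impossible).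
import Mathlib
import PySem

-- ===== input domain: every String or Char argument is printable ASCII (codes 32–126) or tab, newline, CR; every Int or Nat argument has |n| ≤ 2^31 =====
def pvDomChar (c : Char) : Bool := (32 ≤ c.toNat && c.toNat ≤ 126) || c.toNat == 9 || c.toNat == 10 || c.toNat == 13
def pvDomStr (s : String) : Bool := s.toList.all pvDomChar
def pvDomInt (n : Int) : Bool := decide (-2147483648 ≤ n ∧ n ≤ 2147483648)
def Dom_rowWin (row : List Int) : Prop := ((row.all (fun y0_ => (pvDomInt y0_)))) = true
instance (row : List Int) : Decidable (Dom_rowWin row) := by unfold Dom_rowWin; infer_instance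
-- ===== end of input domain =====

-- B replaces A's membership scan plus dict-cardinality test by an extrema reduction:
-- win iff nonempty and min(row) == max(row) != 0 (objective: alternative).


-- ===== PORT A =====
-- 'if 0 not in row: build tempDict; if len(tempDict) == 1: return True; return False'
def rowWin (row : List Int) : Bool :=
  if row.contains 0 = false then
    let tempDict : PySem.Dict Int Int :=
      row.foldl (fun d elem => d.insert elem 1) PySem.Dict.empty
    if PySem.Dict.size tempDict == 1 then true else false
  else false

-- ===== PORT B =====
-- 'bool(row) and min(row) == max(row) != 0'
def rowWin_alt (row : List Int) : Bool :=
  if row.isEmpty then false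
  else
    match PySem.List.min? row (fun y => y), PySem.List.max? row (fun y => y) with
    | some m, some M => m == M && M != 0
    | _, _ => false

-- ===== PRECONDITION & SPEC =====
def Spec_rowWin (row : List Int) (out : Bool) : Prop := out = rowWin_alt row
instance (row : List Int) (out : Bool) : Decidable (Spec_rowWin row out) := by unfold Spec_rowWin; infer_instance

-- ===== CLAIM (what is proved, stated in full; the proofs are below) =====
def Claim_equal_rowWin : Prop := ∀ (row : List Int), Dom_rowWin row → Spec_rowWin row (rowWin row)

-- ===== LEMMAS AND PROOFS =====

-- The keys of the dict built by A's loop are exactly set(row) appended to the starting keys.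
theorem keys_foldl_insert (l : List Int) (d : PySem.Dict Int Int) :
    (l.foldl (fun d elem => d.insert elem (1 : Int)) d).keys = PySem.Set.update d.keys l := by
  induction l generalizing d with
  | nil => simp [PySem.Set.update]
  | cons x t ih =>
      simp only [List.foldl_cons, ih, PySem.Set.update_cons]
      congr 1
      by_cases hx : d.contains x
      · rw [PySem.Dict.keys_insert_of_contains _ _ hx,
          PySem.Set.add_of_mem ((PySem.Dict.contains_iff_mem_keys _ _).mp hx)]
      · rw [PySem.Dict.keys_insert_of_not_contains _ _ (by simpa using hx),
          PySem.Set.add_of_not_mem]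
        intro hmem
        exact hx ((PySem.Dict.contains_iff_mem_keys _ _).mpr hmem)

theorem size_foldl_insert (l : List Int) :
    PySem.Dict.size (l.foldl (fun d elem => d.insert elem (1 : Int)) PySem.Dict.empty)
      = (PySem.Set.ofList l).length := by
  have h := keys_foldl_insert l PySem.Dict.empty
  have hk : (PySem.Dict.empty : PySem.Dict Int Int).keys = [] := rfl
  rw [hk, PySem.Set.update_nil_left] at h
  rw [← h]
  simp only [PySem.Dict.size, PySem.Dict.keys, List.length_map]

-- Set.ofList has length 1 exactly when the list is nonempty and all-equal to its head.
theorem ofList_length_one (h : Int) (t : List Int) :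
    (PySem.Set.ofList (h :: t)).length = 1 ↔ ∀ x ∈ t, x = h := by
  rw [PySem.Set.ofList_cons]
  simp only [List.length_cons]
  constructor
  · intro hd x hx
    by_contra hne
    have hm : x ∈ PySem.Set.discard (PySem.Set.ofList t) h := by
      rw [PySem.Set.mem_discard]
      exact ⟨(PySem.Set.mem_ofList _ _).mpr hx, hne⟩
    have : ((PySem.Set.ofList t).discard h).length = 0 := by omega
    rw [List.length_eq_zero_iff] at this
    rw [this] at hm
    exact List.not_mem_nil hm
  · intro hall
    have : (PySem.Set.ofList t).discard h = [] := by
      rw [List.eq_nil_iff_forall_not_mem]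
      intro x hx
      rw [PySem.Set.mem_discard, PySem.Set.mem_ofList] at hx
      exact hx.2 (hall x hx.1)
    rw [this]
    rfl

-- min? = max? on a nonempty list exactly when every element equals the head.
theorem min_eq_max_iff (h : Int) (t : List Int) {m M : Int}
    (hm : PySem.List.min? (h :: t) (fun y => y) = some m)
    (hM : PySem.List.max? (h :: t) (fun y => y) = some M) :
    m = M ↔ ∀ x ∈ h :: t, x = h := by
  constructor
  · intro hmM x hx
    have h1 := PySem.List.min?_isMin hm x hx
    have h2 := PySem.List.max?_isMax hM x hx
    have h3 := PySem.List.min?_isMin hm h (List.mem_cons_self)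
    have h4 := PySem.List.max?_isMax hM h (List.mem_cons_self)
    simp only at h1 h2 h3 h4
    omega
  · intro hall
    have h1 := hall m (PySem.List.min?_mem hm)
    have h2 := hall M (PySem.List.max?_mem hM)
    omega

-- ===== VERDICT (by name: the statement is the Claim_ definition above) =====
theorem rowWin_spec : Claim_equal_rowWin := by
  intro row _
  unfold Spec_rowWin
  cases row with
  | nil => decide
  | cons h t =>
      obtain ⟨m, hm⟩ : ∃ m, PySem.List.min? (h :: t) (fun y => y) = some m := by
        cases e : PySem.List.min? (h :: t) (fun y => y) with
        | none => exact absurd ((PySem.List.min?_eq_none_iff _ _).mp e) (by simp)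
        | some m => exact ⟨m, rfl⟩
      obtain ⟨M, hM⟩ : ∃ M, PySem.List.max? (h :: t) (fun y => y) = some M := by
        cases e : PySem.List.max? (h :: t) (fun y => y) with
        | none => exact absurd ((PySem.List.max?_eq_none_iff _ _).mp e) (by simp)
        | some M => exact ⟨M, rfl⟩
      simp only [rowWin, rowWin_alt, List.isEmpty_cons, hm, hM, if_neg (by simp : ¬(false = true))]
      have hmle := PySem.List.min?_isMin hm
      have hMge := PySem.List.max?_isMax hM
      by_cases h0 : (0 : Int) ∈ h :: t
      · rw [List.contains_iff_mem.mpr h0]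
        rw [if_neg (by simp)]
        by_cases hmM : m = M
        · have hall := (min_eq_max_iff h t hm hM).mp hmM
          have hh0 : h = 0 := (hall 0 h0).symm
          have hM0 : M = 0 := hall M (PySem.List.max?_mem hM) |>.trans hh0
          simp [hM0]
        · simp [hmM]
      · have hc : (h :: t).contains 0 = false := by
          cases hcc : (h :: t).contains 0 with
          | true => exact absurd (List.contains_iff_mem.mp hcc) h0
          | false => rfl
        rw [hc, if_pos rfl]
        rw [size_foldl_insert (h :: t)]
        have hM0 : M ≠ 0 := fun e => h0 (e ▸ PySem.List.max?_mem hM)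
        by_cases hall : ∀ x ∈ t, x = h
        · have hall' : ∀ x ∈ h :: t, x = h := by
            intro x hx
            rcases List.mem_cons.mp hx with rfl | hx
            · rfl
            · exact hall x hx
          have hmM : m = M := (min_eq_max_iff h t hm hM).mpr hall'
          rw [if_pos (by simpa using (ofList_length_one h t).mpr hall)]
          simp [hmM, hM0]
        · have hmM : m ≠ M := fun e => hall (fun x hx => (min_eq_max_iff h t hm hM).mp e x (List.mem_cons_of_mem _ hx))
          rw [if_neg (by
            simp only [beq_iff_eq]
            exact fun e => hall ((ofList_length_one h t).mp e))]
          simp [hmM]
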